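-- pv_equiv track=rewrite | github.com/masahiro-999/atcoder-workspace | agc029/A/main.py | solve
-- ===== SOURCE A (Python) =====
-- def solve(S: str):
--     first_b = S.find("B")
--     if first_b == -1:
--         return 0
--     S = S[first_b:]
--     d = [0]*len(S)
--     s = 0
--     for i in range(len(S)-1, -1, -1):
--         if S[i] == "W":
--             s += 1
--         d[i] = s
--
--     ans = 0
--     for i in range(len(S)):
--         if S[i] == "B":
--             ans += d[i]
--
--     return ans
-- ===== SOURCE B (Python) =====
-- def solve(S: str):
--     b = 0
--     ans = 0
--     for c in S:
--         if c == "W":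
--             ans += b
--         elif c == "B":
--             b += 1
--     return ans
-- ===== Notes on version B (the rewrite author's own statement) =====
-- stated objective: simpler
-- what changed: Replaced the find/trim plus backward suffix-W-count array and second summing pass by a single forward pass keeping a running count of B's seen, adding it on each W (same total: W's right of each B = B's left of each W).
import Mathlib
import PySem

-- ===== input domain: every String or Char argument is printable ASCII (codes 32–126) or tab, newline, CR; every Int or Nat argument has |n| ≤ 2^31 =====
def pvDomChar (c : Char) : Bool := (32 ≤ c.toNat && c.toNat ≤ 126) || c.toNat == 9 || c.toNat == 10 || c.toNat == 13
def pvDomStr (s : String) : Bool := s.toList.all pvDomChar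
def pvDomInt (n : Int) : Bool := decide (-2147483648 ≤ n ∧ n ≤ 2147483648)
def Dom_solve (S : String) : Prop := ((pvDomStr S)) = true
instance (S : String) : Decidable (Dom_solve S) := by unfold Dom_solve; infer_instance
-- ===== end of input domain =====

-- B replaces A's find/trim + backward suffix-W-count array + second summing pass by one
-- forward pass keeping a running count of B's (objective: simpler, O(1) extra space).

-- ===== PORT A =====
-- A's backward loop "for i in range(len(S)-1,-1,-1): if S[i]=='W': s+=1; d[i]=s":
-- processing the suffix first = structural recursion returning (d, s).
def buildD : List Char → List Int × Int
  | [] => ([], 0)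
  | c :: t =>
    let p := buildD t
    let s' := if c = 'W' then p.2 + 1 else p.2
    (s' :: p.1, s')

def solve (S : String) : Int :=
  let first_b : Int := PySem.Str.find S "B"
  if first_b = -1 then 0
  else
    let L := PySem.List.slice S.toList (some first_b) none   -- S = S[first_b:]
    let d := (buildD L).1
    -- "ans = 0; for i in range(len(S)): if S[i]=='B': ans += d[i]"
    (L.zip d).foldl (fun ans cx => if cx.1 = 'B' then ans + cx.2 else ans) 0

-- ===== PORT B =====
def solve_alt (S : String) : Int :=
  (S.toList.foldl
    (fun (st : Int × Int) c =>
      if c = 'W' then (st.1, st.2 + st.1)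
      else if c = 'B' then (st.1 + 1, st.2)
      else st)
    (0, 0)).2

-- ===== PRECONDITION & SPEC =====
def Spec_solve (S : String) (out : Int) : Prop := out = solve_alt S
instance (S : String) (out : Int) : Decidable (Spec_solve S out) := by unfold Spec_solve; infer_instance

-- ===== CLAIM (what is proved, stated in full; the proofs are below) =====
def Claim_equal_solve : Prop := ∀ (S : String), Dom_solve S → Spec_solve S (solve S)

-- ===== LEMMAS AND PROOFS =====

-- number of 'W' in L, as an Int
def gW (L : List Char) : Int := (L.count 'W' : Int)

-- the common value: sum over positions holding 'B' of the 'W'-count of the strict suffix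
def gA : List Char → Int
  | [] => 0
  | c :: t => (if c = 'B' then gW t else 0) + gA t

theorem gW_cons (c : Char) (t : List Char) :
    gW (c :: t) = if c = 'W' then gW t + 1 else gW t := by
  by_cases h : c = 'W' <;> simp [gW, h]

theorem buildD_snd (L : List Char) : (buildD L).2 = gW L := by
  induction L with
  | nil => simp [buildD, gW]
  | cons c t ih => simp [buildD, ih, gW_cons]

theorem solve_sum_eq (L : List Char) (a : Int) :
    ((L.zip (buildD L).1).foldl (fun ans cx => if cx.1 = 'B' then ans + cx.2 else ans) a)
      = a + gA L := by
  induction L generalizing a with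
  | nil => simp [buildD, gA]
  | cons c t ih =>
    simp only [buildD, List.zip_cons_cons, List.foldl_cons, ih, gA]
    rw [buildD_snd]
    by_cases hB : c = 'B'
    · have hW : ¬ c = 'W' := by subst hB; decide
      simp [hB]
      ring
    · simp [hB]

theorem solve_alt_foldl (L : List Char) (b a : Int) :
    (L.foldl
      (fun (st : Int × Int) c =>
        if c = 'W' then (st.1, st.2 + st.1)
        else if c = 'B' then (st.1 + 1, st.2)
        else st)
      (b, a)).2 = a + b * gW L + gA L := by
  induction L generalizing b a with
  | nil => simp [gW, gA]
  | cons c t ih =>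
    by_cases hW : c = 'W'
    · have hB : ¬ c = 'B' := by subst hW; decide
      simp only [List.foldl_cons, hW, ih, gA, gW_cons]
      simp
      ring
    · by_cases hB : c = 'B'
      · simp only [List.foldl_cons, hB, ih, gA, gW_cons]
        simp
        ring
      · simp only [List.foldl_cons, if_neg hW, if_neg hB, ih, gA, gW_cons]
        simp

theorem gA_eq_zero_of_not_mem (L : List Char) (h : 'B' ∉ L) : gA L = 0 := by
  induction L with
  | nil => rfl
  | cons c t ih =>
    simp only [List.mem_cons, not_or] at h
    simp [gA, Ne.symm h.1, ih h.2]

theorem singleton_prefix_iff_head? (b : Char) (xs : List Char) :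
    [b] <+: xs ↔ xs.head? = some b := by
  cases xs with
  | nil => simp
  | cons x t => simp [List.cons_prefix_cons, eq_comm]

theorem gA_drop (L : List Char) (k : Nat) (h : ∀ i < k, L[i]? ≠ some 'B') :
    gA (L.drop k) = gA L := by
  induction L generalizing k with
  | nil => simp
  | cons c t ih =>
    cases k with
    | zero => rfl
    | succ k =>
      have hc : c ≠ 'B' := by
        intro hc; exact h 0 (Nat.succ_pos k) (by simp [hc])
      have : gA (c :: t) = gA t := by simp [gA, hc]
      rw [List.drop_succ_cons, this]
      exact ih k (fun i hi => by simpa using h (i + 1) (by omega))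

theorem solve_eq_gA (S : String) : solve S = gA S.toList := by
  unfold solve
  have hfind : PySem.Str.find S "B" = PySem.Chars.find S.toList ['B'] := by
    simp [PySem.Str.find_eq]
  by_cases h : PySem.Str.find S "B" = -1
  · rw [if_pos h]
    rw [hfind] at h
    have hnot : ¬ ['B'] <:+: S.toList := (PySem.Chars.find_eq_neg_one_iff _ _).mp h
    rw [List.singleton_infix_iff] at hnot
    exact (gA_eq_zero_of_not_mem _ hnot).symm
  · rw [if_neg h]
    have hge : 0 ≤ PySem.Str.find S "B" := by
      have := PySem.Chars.neg_one_le_find S.toList ['B']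
      rw [hfind]; omega
    rw [PySem.List.slice_from _ hge]
    rw [solve_sum_eq, zero_add]
    apply gA_drop
    intro i hi hcontra
    rw [hfind] at h hge
    have hspec := (PySem.Chars.find_spec hge).2 i (by
      simpa [hfind] using hi)
    exact hspec ((singleton_prefix_iff_head? 'B' (S.toList.drop i)).mpr
      (by rw [List.head?_drop]; exact hcontra))

theorem solve_alt_eq_gA (S : String) : solve_alt S = gA S.toList := by
  unfold solve_alt
  rw [solve_alt_foldl]
  ring

-- ===== VERDICT (by name: the statement is the Claim_ definition above) =====
theorem solve_spec : Claim_equal_solve := by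
  intro S _
  unfold Spec_solve
  rw [solve_eq_gA, solve_alt_eq_gA]
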